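-- pv_equiv track=rewrite | github.com/KaneOrca/ClawSeat | core/skills/qa/scripts/install_qa_patrol_cron.py | remove_entry
-- ===== SOURCE A (Python) =====
-- MARKER = "# ClawSeat QA patrol"
--
-- def remove_entry(text: str) -> str:
--     lines = text.splitlines()
--     kept: list[str] = []
--     skip = 0
--     for line in lines:
--         if skip:
--             skip -= 1
--             continue
--         if line == MARKER:
--             skip = 2
--             continue
--         kept.append(line)
--     return "\n".join(kept).rstrip() + ("\n" if kept else "")
-- ===== SOURCE B (Python) =====
-- MARKER = "# ClawSeat QA patrol"
--
-- def remove_entry(text: str) -> str: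
--     # Search-and-slice: locate each marker with list.index and copy whole
--     # untouched slices at once, instead of a per-line state machine.
--     lines = text.splitlines()
--     kept: list[str] = []
--     pos = 0
--     while True:
--         try:
--             m = lines.index(MARKER, pos)
--         except ValueError:
--             kept.extend(lines[pos:])
--             break
--         kept.extend(lines[pos:m])
--         pos = m + 3
--     return "\n".join(kept).rstrip() + ("\n" if kept else "")
-- ===== Notes on version B (the rewrite author's own statement) =====
-- stated objective: alternative
-- what changed: Replaces the per-line skip-counter state machine by a search-and-slice loop: list.index finds each marker and whole untouched slices are copied at once.
import Mathlib
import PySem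

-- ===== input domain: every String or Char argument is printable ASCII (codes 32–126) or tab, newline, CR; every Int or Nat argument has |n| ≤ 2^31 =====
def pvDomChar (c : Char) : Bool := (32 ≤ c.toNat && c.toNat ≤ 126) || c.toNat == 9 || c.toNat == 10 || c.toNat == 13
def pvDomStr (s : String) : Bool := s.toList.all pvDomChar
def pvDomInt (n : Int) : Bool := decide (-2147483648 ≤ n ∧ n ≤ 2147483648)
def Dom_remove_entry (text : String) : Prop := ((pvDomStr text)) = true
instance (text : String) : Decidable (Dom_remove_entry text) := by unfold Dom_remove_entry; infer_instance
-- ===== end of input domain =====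

-- B replaces A's per-line skip-counter state machine by a search-and-slice loop: it finds each
-- marker with list.index and copies whole untouched slices at once (alternative decomposition).

def pvMARKER : String := "# ClawSeat QA patrol"

-- ===== PORT A =====
def pvStepA (st : List String × Nat) (line : String) : List String × Nat :=
  if st.2 ≠ 0 then (st.1, st.2 - 1)
  else if line == pvMARKER then (st.1, 2)
  else (st.1 ++ [line], 0)

def remove_entry (text : String) : String :=
  let lines := PySem.Str.splitlines text
  let kept := (lines.foldl pvStepA ([], 0)).1
  PySem.Str.rstrip (PySem.Str.join "\n" kept) ++ (if kept ≠ [] then "\n" else "")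

-- ===== PORT B =====
-- lines.index(v, pos) is ported as pos + (index? of the list with its first pos elements dropped):
-- exact for 0 ≤ pos (Python searches from pos and returns an absolute index, ValueError ↦ none).
def pvGoB (lines : List String) (pos : Nat) (kept : List String) : List String :=
  match h : PySem.List.index? (lines.drop pos) pvMARKER with
  | none => kept ++ PySem.List.slice lines (some (pos : Int)) none            -- lines[pos:]
  | some k =>
      pvGoB lines (pos + k + 3)
        (kept ++ PySem.List.slice lines (some (pos : Int)) (some ((pos + k : Nat) : Int)))  -- lines[pos:m]
termination_by lines.length - pos
decreasing_by
  have hm : pvMARKER ∈ lines.drop pos := by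
    refine (PySem.List.index?_isSome_iff _ _).1 ?_
    rw [h]
    rfl
  have : pos < lines.length := by
    by_contra hc
    rw [List.drop_eq_nil_of_le (by omega)] at hm
    simp at hm
  omega

def remove_entry_alt (text : String) : String :=
  let lines := PySem.Str.splitlines text
  let kept := pvGoB lines 0 []
  PySem.Str.rstrip (PySem.Str.join "\n" kept) ++ (if kept ≠ [] then "\n" else "")

-- ===== PRECONDITION & SPEC =====
def Spec_remove_entry (text : String) (out : String) : Prop := out = remove_entry_alt text
instance (text : String) (out : String) : Decidable (Spec_remove_entry text out) := by unfold Spec_remove_entry; infer_instance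

-- ===== CLAIM (what is proved, stated in full; the proofs are below) =====
def Claim_equal_remove_entry : Prop := ∀ (text : String), Dom_remove_entry text → Spec_remove_entry text (remove_entry text)

-- ===== LEMMAS AND PROOFS =====

-- the common recursive characterisation of the kept lines
def pvH (lines : List String) : List String :=
  match lines with
  | [] => []
  | l :: ls => if l == pvMARKER then pvH (ls.drop 2) else l :: pvH ls
termination_by lines.length
decreasing_by
  · simp only [List.length_drop, List.length_cons]; omega
  · simp only [List.length_cons]; omega

-- A's fold with a pending skip s = fold over the suffix
theorem pvSkipA (lines : List String) : ∀ (s : Nat) (kept : List String),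
    (lines.foldl pvStepA (kept, s)).1 = ((lines.drop s).foldl pvStepA (kept, 0)).1 := by
  induction lines with
  | nil => intro s kept; simp
  | cons l ls ih =>
    intro s kept
    cases s with
    | zero => simp
    | succ s =>
      rw [List.foldl_cons,
        show pvStepA (kept, s + 1) l = (kept, s) from by simp [pvStepA],
        List.drop_succ_cons]
      exact ih s kept

theorem pvFoldA_eq_pvH (lines : List String) : ∀ (kept : List String),
    (lines.foldl pvStepA (kept, 0)).1 = kept ++ pvH lines := by
  induction lines using pvH.induct with
  | case1 => intro kept; simp [pvH]
  | case2 l ls hm ih =>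
    intro kept
    rw [List.foldl_cons,
      show pvStepA (kept, 0) l = (kept, 2) from by simp [pvStepA, hm],
      pvSkipA, ih, pvH, if_pos hm]
  | case3 l ls hm ih =>
    intro kept
    rw [List.foldl_cons,
      show pvStepA (kept, 0) l = (kept ++ [l], 0) from by simp [pvStepA, hm],
      ih, pvH, if_neg hm]
    simp

-- no marker ⇒ pvH keeps everything
theorem pvH_no_marker : ∀ (xs : List String), pvMARKER ∉ xs → pvH xs = xs := by
  intro xs
  induction xs with
  | nil => intro _; simp [pvH]
  | cons l ls ih =>
    intro h
    rw [pvH, if_neg (show ¬(l == pvMARKER) = true by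
        simp only [beq_iff_eq]
        rintro rfl
        exact h List.mem_cons_self),
      ih (fun hm => h (List.mem_cons_of_mem _ hm))]

-- pvH over a marker-free prefix followed by a marker
theorem pvH_prefix_marker : ∀ (a b : List String), pvMARKER ∉ a →
    pvH (a ++ pvMARKER :: b) = a ++ pvH (b.drop 2) := by
  intro a
  induction a with
  | nil => intro b _; simp [pvH]
  | cons x xs ih =>
    intro b h
    rw [List.cons_append, pvH, if_neg (show ¬(x == pvMARKER) = true by
        simp only [beq_iff_eq]
        rintro rfl
        exact h List.mem_cons_self),
      ih b (fun hm => h (List.mem_cons_of_mem _ hm))]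
    simp

theorem pvGoB_eq_pvH (lines : List String) : ∀ (pos : Nat) (kept : List String),
    pvGoB lines pos kept = kept ++ pvH (lines.drop pos) := by
  intro pos kept
  induction pos, kept using pvGoB.induct (lines := lines) with
  | case1 pos kept h =>
    rw [pvGoB]
    split
    · rw [PySem.List.index?_eq_idxOf?] at h
      rw [pvH_no_marker _ (List.idxOf?_eq_none_iff.mp h), PySem.List.slice_from_natCast]
    · next k h' =>
        rw [h] at h'
        simp at h'
  | case2 pos kept k h ih =>
    rw [pvGoB]
    split
    · next h' =>
        rw [h] at h'
        simp at h'
    next k' h' =>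
    rw [h] at h'
    injection h' with hk
    subst hk
    rw [ih]
    rw [PySem.List.index?_eq_some_iff] at h
    obtain ⟨a, b, hab, hlen, hnm⟩ := h
    have hslice : PySem.List.slice lines (some (pos : Int)) (some ((pos + k : Nat) : Int)) = a := by
      rw [show ((pos + k : Nat) : Int) = ((pos : Nat) : Int) + ((k : Nat) : Int) by push_cast; ring,
        PySem.List.slice_natCast_add, hab, ← hlen, List.take_left]
    have hdrop : lines.drop (pos + k + 3) = b.drop 2 := by
      have hsplit : lines.drop (pos + k + 3) = (lines.drop pos).drop (k + 3) := by
        rw [List.drop_drop, Nat.add_assoc]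
      rw [hsplit, hab, List.drop_append, List.drop_eq_nil_of_le (by omega),
        List.nil_append, show k + 3 - a.length = 2 + 1 by omega, List.drop_succ_cons]
    rw [hslice, hdrop, hab, pvH_prefix_marker a b hnm, List.append_assoc]

-- ===== VERDICT (by name: the statement is the Claim_ definition above) =====
theorem remove_entry_spec : Claim_equal_remove_entry := by
  intro text _
  unfold Spec_remove_entry remove_entry remove_entry_alt
  have h : ((PySem.Str.splitlines text).foldl pvStepA ([], 0)).1
      = pvGoB (PySem.Str.splitlines text) 0 [] := by
    rw [pvFoldA_eq_pvH, pvGoB_eq_pvH]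
    simp
  simp only [h]
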